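-- pv_equiv track=rewrite | github.com/madhavagarwal3012/Python-Programs | All Python Programs/PROGRAM 9.py | find
-- ===== SOURCE A (Python) =====
-- def find(n, m):
--     f1 = 0
--     f2 = 1
--     i =2;
--     while i!=0:
--         f3 = f1 + f2;
--         f1 = f2;
--         f2 = f3;
--
--         if f2%n == 0:
--             return m*i
--
--         i+=1
--
--     return
-- ===== SOURCE B (Python) =====
-- def find(n, m):
--     # Materialise the whole Pisano period of residues mod n, then locate the
--     # first zero positionally with list.index.
--     start = (0, 1 % n)
--     residues = []
--     pair = start
--     while True:
--         a, b = pair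
--         pair = (b, (a + b) % n)
--         residues.append(pair[1])
--         if pair == start:
--             break
--     return m * (2 + residues.index(0))
-- ===== Notes on version B (the rewrite author's own statement) =====
-- stated objective: alternative
-- what changed: B replaces A's early-return scan over ever-growing bignum Fibonacci numbers by two stages: it first materialises the full Pisano-period residue table mod n (stopping when the residue pair returns to its start value), then finds the answer positionally with list.index(0) over that table.
-- outside the precondition, e.g. on find(0, 1): A raises ZeroDivisionError, B raises ZeroDivisionError
import Mathlib
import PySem

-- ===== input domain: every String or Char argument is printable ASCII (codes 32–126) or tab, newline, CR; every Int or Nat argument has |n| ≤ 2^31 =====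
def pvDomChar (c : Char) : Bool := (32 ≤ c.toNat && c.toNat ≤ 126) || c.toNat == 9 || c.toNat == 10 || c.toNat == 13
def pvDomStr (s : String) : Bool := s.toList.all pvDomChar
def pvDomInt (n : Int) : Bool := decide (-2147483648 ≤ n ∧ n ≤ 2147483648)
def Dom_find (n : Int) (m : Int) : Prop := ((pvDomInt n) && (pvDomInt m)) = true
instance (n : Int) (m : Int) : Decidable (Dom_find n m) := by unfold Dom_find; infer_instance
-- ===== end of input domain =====

-- B replaces A's early-return scan over growing bignum Fibonacci numbers by two stages:
-- materialise the Pisano-period residue table mod n, then list.index the first 0.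

-- ===== PORT A =====
-- the 'while i != 0' loop; the fuel is only a totality guard (the proof shows the first
-- Fibonacci multiple of n has index ≤ n^2 + 1, so the fuel is never exhausted for n ≠ 0)
def findLoopA (n m : Int) : Nat → Int → Int → Int → Int
  | 0, _, _, _ => 0
  | fuel+1, f1, f2, i =>
    if i ≠ 0 then
      let f3 := f1 + f2
      if PySem.Int.mod f3 n = 0 then m * i
      else findLoopA n m fuel f2 f3 (i + 1)
    else 0

def find (n : Int) (m : Int) : Int :=
  findLoopA n m (n.natAbs * n.natAbs + 4) 0 1 2

-- ===== PORT B =====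
-- the 'while True' loop of Source B: step the residue pair, append, stop when the pair
-- returns to its start value; fuel is only a totality guard (Pisano period ≤ n^2)
def findLoopB (n : Int) (s0 s1 : Int) : Nat → Int → Int → List Int → List Int
  | 0, _, _, acc => acc
  | fuel+1, a, b, acc =>
    let b' := PySem.Int.mod (a + b) n
    let acc' := acc ++ [b']
    if (b, b') = (s0, s1) then acc'
    else findLoopB n s0 s1 fuel b b' acc'

def find_alt (n : Int) (m : Int) : Int :=
  let s0 : Int := 0
  let s1 : Int := PySem.Int.mod 1 n
  let residues := findLoopB n s0 s1 (n.natAbs * n.natAbs + 4) s0 s1 []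
  match PySem.List.index? residues 0 with
  | some j => m * (2 + (j : Int))
  | none => 0          -- dead branch: 0 is always in the period table (proved below)

-- ===== PRECONDITION & SPEC =====
-- Python A raises ZeroDivisionError at 'f2 % n' when n = 0 (B raises too); excluded.
def Pre_find (n : Int) (m : Int) : Prop := n ≠ 0
instance (n : Int) (m : Int) : Decidable (Pre_find n m) := by unfold Pre_find; infer_instance

def pvWitness_find : Int × Int := (2, 3)

def Spec_find (n : Int) (m : Int) (out : Int) : Prop := out = find_alt n m
instance (n : Int) (m : Int) (out : Int) : Decidable (Spec_find n m out) := by unfold Spec_find; infer_instance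

-- ===== CLAIM (what is proved, stated in full; the proofs are below) =====
def Claim_equal_find : Prop := ∀ (n : Int) (m : Int), Dom_find n m → Pre_find n m → Spec_find n m (find n m)

-- ===== LEMMAS AND PROOFS =====

-- Fibonacci over ℤ
def fibZ (k : ℕ) : Int := (Nat.fib k : Int)

theorem fibZ_add_two (k : ℕ) : fibZ (k + 2) = fibZ k + fibZ (k + 1) := by
  unfold fibZ; push_cast [Nat.fib_add_two]; ring

-- Python's % is congruence-preserving: n divides x - (x % n).
theorem pv_dvd_sub_mod (n x : Int) : n ∣ x - PySem.Int.mod x n := by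
  have h := PySem.Int.floordiv_mul_add_mod x n
  exact ⟨PySem.Int.floordiv x n, by linarith⟩

-- congruent numbers have the same Python residue
theorem pv_mod_congr (n x y : Int) (hn : n ≠ 0) (h : n ∣ x - y) :
    PySem.Int.mod x n = PySem.Int.mod y n := by
  have hx := pv_dvd_sub_mod n x
  have hy := pv_dvd_sub_mod n y
  have hd : n ∣ PySem.Int.mod x n - PySem.Int.mod y n := by
    have e : PySem.Int.mod x n - PySem.Int.mod y n
        = (x - y) - (x - PySem.Int.mod x n) + (y - PySem.Int.mod y n) := by ring
    rw [e]
    exact Int.dvd_add (Int.dvd_sub h hx) hy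
  have habs : |PySem.Int.mod x n - PySem.Int.mod y n| < |n| := by
    rcases lt_or_gt_of_ne hn with hneg | hpos
    · have b1 := PySem.Int.mod_neg_bounds (a := x) hneg
      have b2 := PySem.Int.mod_neg_bounds (a := y) hneg
      rw [abs_lt, abs_of_neg hneg]
      omega
    · have b1l := PySem.Int.mod_nonneg (a := x) hpos
      have b1u := PySem.Int.mod_lt (a := x) hpos
      have b2l := PySem.Int.mod_nonneg (a := y) hpos
      have b2u := PySem.Int.mod_lt (a := y) hpos
      rw [abs_lt, abs_of_pos hpos]; omega
  have := Int.eq_zero_of_abs_lt_dvd ((abs_dvd n _).mpr hd) habs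
  omega

-- the reduced residue of fibZ
def gRes (n : Int) (k : ℕ) : Int := PySem.Int.mod (fibZ k) n

theorem gRes_zero_iff (n : Int) (k : ℕ) : gRes n k = 0 ↔ n ∣ fibZ k :=
  PySem.Int.mod_eq_zero_iff_dvd _ _

theorem gRes_step (n : Int) (hn : n ≠ 0) (t : ℕ) :
    PySem.Int.mod (gRes n t + gRes n (t+1)) n = gRes n (t+2) := by
  apply pv_mod_congr n _ _ hn
  rw [fibZ_add_two]
  have h1 := pv_dvd_sub_mod n (fibZ t)
  have h2 := pv_dvd_sub_mod n (fibZ (t+1))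
  have e : gRes n t + gRes n (t+1) - (fibZ t + fibZ (t+1))
      = -((fibZ t - gRes n t) + (fibZ (t+1) - gRes n (t+1))) := by
    unfold gRes; ring
  rw [e, dvd_neg]
  exact Int.dvd_add h1 h2

theorem gRes_eq_s1_iff (n : Int) (hn : n ≠ 0) (k : ℕ) :
    gRes n k = PySem.Int.mod 1 n ↔ n ∣ fibZ k - 1 := by
  constructor
  · intro h
    have h1 := pv_dvd_sub_mod n (fibZ k)
    have h2 := pv_dvd_sub_mod n 1
    have e : fibZ k - 1 = (fibZ k - gRes n k) - (1 - PySem.Int.mod 1 n)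
        + (gRes n k - PySem.Int.mod 1 n) := by ring
    rw [e, show gRes n k - PySem.Int.mod 1 n = 0 by rw [h]; ring]
    simpa using Int.dvd_sub h1 h2
  · intro h
    exact pv_mod_congr n _ _ hn h

-- the "period has closed" predicate: pair (fib t, fib (t+1)) ≡ (0, 1) mod n
def PClose (n : Int) (t : ℕ) : Prop := n ∣ fibZ t ∧ n ∣ (fibZ (t+1) - 1)

-- ZMod pair sequence for the pigeonhole argument
def hPair (N : ℕ) (k : ℕ) : ZMod N × ZMod N := ((fibZ k : ZMod N), (fibZ (k+1) : ZMod N))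

theorem hPair_back (N : ℕ) : ∀ (a d : ℕ), hPair N a = hPair N (a + d) → hPair N 0 = hPair N d := by
  intro a
  induction a with
  | zero => intro d h; simpa using h
  | succ a ih =>
    intro d h
    apply ih
    have h1 : ((fibZ (a+1) : ZMod N)) = ((fibZ (a+1+d) : ZMod N)) := congrArg Prod.fst h
    have h2 : ((fibZ (a+2) : ZMod N)) = ((fibZ (a+1+d+1) : ZMod N)) := congrArg Prod.snd h
    have e1 : (fibZ a : ZMod N) = (fibZ (a+2) : ZMod N) - (fibZ (a+1) : ZMod N) := by
      rw [fibZ_add_two]; push_cast; ring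
    have e2 : (fibZ (a+d) : ZMod N) = (fibZ (a+d+2) : ZMod N) - (fibZ (a+d+1) : ZMod N) := by
      rw [fibZ_add_two]; push_cast; ring
    unfold hPair
    have ha : a + 1 + d = a + d + 1 := by omega
    have hb : a + 1 + d + 1 = a + d + 2 := by omega
    rw [ha] at h1; rw [hb] at h2
    exact Prod.ext (by rw [e1, e2, ← h1, ← h2]) h1

-- pigeonhole: some t with 1 ≤ t ≤ n² closes the period
theorem pclose_exists (n : Int) (hn : n ≠ 0) :
    ∃ t, 1 ≤ t ∧ t ≤ n.natAbs * n.natAbs ∧ PClose n t := by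
  set N := n.natAbs with hN
  haveI : NeZero N := ⟨by omega⟩
  have hcard : Fintype.card (ZMod N × ZMod N) = N * N := by simp [ZMod.card]
  have hmaps : ∀ a ∈ Finset.range (N*N+1), hPair N a ∈ (Finset.univ : Finset (ZMod N × ZMod N)) :=
    fun a _ => Finset.mem_univ _
  obtain ⟨x, hx, y, hy, hxy, hmapeq⟩ :=
    Finset.exists_ne_map_eq_of_card_lt_of_maps_to
      (by rw [Finset.card_univ, hcard, Finset.card_range]; omega) hmaps
  rw [Finset.mem_range] at hx hy
  -- wlog x < y
  rcases Nat.lt_or_ge x y with hlt' | hge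
  case _ =>
    refine ⟨y - x, by omega, by omega, ?_⟩
    have h0 : hPair N 0 = hPair N (y - x) := hPair_back N x (y - x) (by rw [show x + (y-x) = y by omega]; exact hmapeq)
    have hz : ((fibZ (y-x) : ZMod N)) = 0 := by
      have := congrArg Prod.fst h0
      simpa [hPair, fibZ] using this.symm
    have ho : ((fibZ (y-x+1) : ZMod N)) = 1 := by
      have := congrArg Prod.snd h0
      simpa [hPair, fibZ] using this.symm
    constructor
    · rw [← Int.natAbs_dvd, ← hN, ← ZMod.intCast_zmod_eq_zero_iff_dvd]; exact hz
    · rw [← Int.natAbs_dvd, ← hN, ← ZMod.intCast_zmod_eq_zero_iff_dvd]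
      push_cast
      rw [ho]; ring
  case _ =>
    have hlt'' : y < x := by omega
    refine ⟨x - y, by omega, by omega, ?_⟩
    have h0 : hPair N 0 = hPair N (x - y) := hPair_back N y (x - y) (by rw [show y + (x-y) = x by omega]; exact hmapeq.symm)
    have hz : ((fibZ (x-y) : ZMod N)) = 0 := by
      have := congrArg Prod.fst h0
      simpa [hPair, fibZ] using this.symm
    have ho : ((fibZ (x-y+1) : ZMod N)) = 1 := by
      have := congrArg Prod.snd h0
      simpa [hPair, fibZ] using this.symm
    constructor
    · rw [← Int.natAbs_dvd, ← hN, ← ZMod.intCast_zmod_eq_zero_iff_dvd]; exact hz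
    · rw [← Int.natAbs_dvd, ← hN, ← ZMod.intCast_zmod_eq_zero_iff_dvd]
      push_cast
      rw [ho]; ring

-- A's loop returns m*α where α is the least index ≥ 2 with n ∣ fib α
theorem loopA_result (n m : Int) (α : ℕ)
    (hα2 : 2 ≤ α) (hαd : n ∣ fibZ α) (hαmin : ∀ j, 2 ≤ j → j < α → ¬ n ∣ fibZ j) :
    ∀ (fuel t : ℕ), t + 2 ≤ α → α - (t + 2) < fuel →
      findLoopA n m fuel (fibZ t) (fibZ (t+1)) ((t : Int) + 2) = m * (α : Int) := by
  intro fuel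
  induction fuel with
  | zero => intro t _ h; omega
  | succ fuel ih =>
    intro t ht hf
    simp only [findLoopA, if_pos (show (t : Int) + 2 ≠ 0 by omega)]
    rw [← fibZ_add_two]
    by_cases hc : PySem.Int.mod (fibZ (t+2)) n = 0
    · rw [if_pos hc]
      have hd := (gRes_zero_iff n (t+2)).mp hc
      have : t + 2 = α := by
        by_contra hne
        exact hαmin (t+2) (by omega) (by omega) hd
      rw [← this]; push_cast; ring
    · rw [if_neg hc]
      have hne : t + 2 ≠ α := by
        intro he; exact hc ((gRes_zero_iff n (t+2)).mpr (he ▸ hαd))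
      have := ih (t+1) (by omega) (by omega)
      rw [show ((t:Int) + 2 + 1) = (((t+1 : ℕ)) : Int) + 2 by push_cast; ring]
      exact this

-- B's loop returns the table [g 2, …, g (K+1)] where K is the first period close
theorem loopB_result (n : Int) (hn : n ≠ 0) (K : ℕ)
    (hK1 : 1 ≤ K) (hKP : PClose n K) (hKmin : ∀ u, 1 ≤ u → u < K → ¬ PClose n u) :
    ∀ (fuel t : ℕ) (acc : List Int), t + 1 ≤ K → K - (t + 1) < fuel →
      findLoopB n 0 (PySem.Int.mod 1 n) fuel (gRes n t) (gRes n (t+1)) acc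
        = acc ++ (List.range (K - t)).map (fun j => gRes n (t + 2 + j)) := by
  intro fuel
  induction fuel with
  | zero => intro t acc _ h; omega
  | succ fuel ih =>
    intro t acc ht hf
    simp only [findLoopB]
    rw [gRes_step n hn t]
    have hcond : ((gRes n (t+1), gRes n (t+2)) = ((0 : Int), PySem.Int.mod 1 n)) ↔ PClose n (t+1) := by
      rw [Prod.mk.injEq, gRes_zero_iff, gRes_eq_s1_iff n hn]
      rfl
    by_cases hc : PClose n (t+1)
    · rw [if_pos (hcond.mpr hc)]
      have : t + 1 = K := by
        by_contra hne
        exact hKmin (t+1) (by omega) (by omega) hc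
      rw [show K - t = 1 by omega]
      simp
    · rw [if_neg (fun h => hc (hcond.mp h))]
      have hKt : t + 1 < K := by
        rcases Nat.lt_or_ge (t+1) K with h | h
        · exact h
        · exfalso; exact hc (by rw [show t + 1 = K by omega]; exact hKP)
      have := ih (t+1) (acc ++ [gRes n (t+2)]) (by omega) (by omega)
      rw [show (t:ℕ)+1+1 = t + 2 by omega] at this
      rw [this, List.append_assoc]
      congr 1
      rw [show K - t = (K - (t+1)) + 1 by omega, List.range_succ_eq_map]
      simp only [List.map_cons, List.map_map, List.singleton_append, Nat.add_zero]
      congr 1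
      apply List.map_congr_left
      intro j _
      simp only [Function.comp]
      congr 1
      omega

-- first zero of a range-map table, for list.index
theorem index?_range_map (f : ℕ → Int) (L k : ℕ) (hk : k < L) (hz : f k = 0)
    (hnz : ∀ j, j < k → f j ≠ 0) :
    PySem.List.index? ((List.range L).map f) 0 = some k := by
  have hsplit : (List.range L).map f
      = (List.range k).map f ++ 0 :: (List.range (L - k - 1)).map (fun j => f (k + 1 + j)) := by
    conv_lhs => rw [show L = k + (1 + (L - k - 1)) by omega, List.range_add, List.range_add]
    simp only [List.map_append, List.map_map, List.range_one, List.map_cons,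
      Nat.add_zero, List.cons_append, List.nil_append, hz]
    congr 1
    congr 1
    apply List.map_congr_left
    intro j _
    simp only [Function.comp]
    congr 1
    omega
  rw [hsplit, PySem.List.index?_eq_some_iff]
  refine ⟨(List.range k).map f, (List.range (L - k - 1)).map (fun j => f (k + 1 + j)),
    rfl, by simp, ?_⟩
  intro hmem
  rw [List.mem_map] at hmem
  obtain ⟨j, hj, hje⟩ := hmem
  rw [List.mem_range] at hj
  exact hnz j hj hje

-- ===== VERDICT (by name: the statement is the Claim_ definition above) =====
theorem find_spec : Claim_equal_find := by
  intro n m _ hn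
  unfold Spec_find find find_alt
  -- K: the least t ≥ 1 closing the period; exists and is ≤ n² by the pigeonhole lemma
  obtain ⟨d, hd1, hdB, hdP⟩ := pclose_exists n hn
  have hQex : ∃ t, 1 ≤ t ∧ PClose n t := ⟨d, hd1, hdP⟩
  letI : DecidablePred (fun t => 1 ≤ t ∧ PClose n t) := fun t => by unfold PClose; infer_instance
  set K := Nat.find hQex with hKdef
  obtain ⟨hK1, hKP⟩ := Nat.find_spec hQex
  rw [← hKdef] at hK1 hKP
  have hKmin : ∀ u, 1 ≤ u → u < K → ¬ PClose n u := fun u hu1 huK hP =>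
    Nat.find_min hQex huK ⟨hu1, hP⟩
  have hKd : K ≤ d := Nat.find_min' hQex ⟨hd1, hdP⟩
  -- α: the least k ≥ 2 with n ∣ fib k
  have hfib2 : fibZ 2 = 1 := by simp [fibZ]
  have hRex : ∃ k, 2 ≤ k ∧ n ∣ fibZ k := by
    rcases Nat.lt_or_ge K 2 with h | h
    · -- K = 1: n ∣ fib 1 = 1 = fib 2
      have hK1' : K = 1 := by omega
      refine ⟨2, le_refl _, ?_⟩
      have h1 := hKP.1
      rw [hK1'] at h1
      rw [hfib2]
      simpa [fibZ] using h1
    · exact ⟨K, h, hKP.1⟩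
  set α := Nat.find hRex with hαdef
  obtain ⟨hα2, hαd⟩ := Nat.find_spec hRex
  rw [← hαdef] at hα2 hαd
  have hαmin : ∀ j, 2 ≤ j → j < α → ¬ n ∣ fibZ j := fun j hj2 hjα hdv =>
    Nat.find_min hRex hjα ⟨hj2, hdv⟩
  have hαK : α ≤ K + 1 := by
    rcases Nat.lt_or_ge K 2 with h | h
    · have hK1' : K = 1 := by omega
      have h1 := hKP.1
      rw [hK1'] at h1
      have : α ≤ 2 := Nat.find_min' hRex ⟨le_refl _, by rw [hfib2]; simpa [fibZ] using h1⟩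
      omega
    · have : α ≤ K := Nat.find_min' hRex ⟨h, hKP.1⟩
      omega
  -- compute A's value
  have hA : findLoopA n m (n.natAbs * n.natAbs + 4) 0 1 2 = m * (α : Int) := by
    have := loopA_result n m α hα2 hαd hαmin (n.natAbs * n.natAbs + 4) 0
      (by omega) (by omega)
    simpa [fibZ] using this
  -- compute B's residue table
  have hg0 : gRes n 0 = 0 := by
    rw [gRes_zero_iff]; simp [fibZ]
  have hg1 : gRes n 1 = PySem.Int.mod 1 n := by
    unfold gRes fibZ; norm_num
  have hB : findLoopB n 0 (PySem.Int.mod 1 n) (n.natAbs * n.natAbs + 4)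
      0 (PySem.Int.mod 1 n) [] = (List.range K).map (fun j => gRes n (2 + j)) := by
    have := loopB_result n hn K hK1 hKP hKmin (n.natAbs * n.natAbs + 4) 0 []
      (by omega) (by omega)
    rw [hg0, hg1] at this
    simpa using this
  -- the first zero of the table sits at position α - 2
  have hidx : PySem.List.index? ((List.range K).map (fun j => gRes n (2 + j))) 0
      = some (α - 2) := by
    apply index?_range_map
    · omega
    · rw [show 2 + (α - 2) = α by omega, gRes_zero_iff]; exact hαd
    · intro j hj
      rw [Ne, gRes_zero_iff]
      exact hαmin (2 + j) (by omega) (by omega)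
  simp only [hA, hB, hidx]
  have : ((2 : Int) + ((α - 2 : ℕ) : Int)) = (α : Int) := by omega
  rw [this]
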